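-- pv_equiv track=rewrite | github.com/YashB63/GFG-Daily-Questions | Day 62/Type it!/type_it.py | minOperation
-- ===== SOURCE A (Python) =====
-- def minOperation(s):
--
--     x = 0
--     n = len(s)
--     for i in range(1, n//2+1):
--         if s[:i] == s[i:i*2]:
--             x = i
--     if x == 0:
--
--         return n
--
--     return n - x + 1
-- ===== SOURCE B (Python) =====
-- def minOperation(s):
--     # Z-algorithm: compute z[i] = length of the longest common prefix of s and
--     # s[i:] in O(n) using the [l, r) match box, and keep the largest i <= n//2
--     # with z[i] >= i (prefix of length i repeats at offset i).
--     n = len(s)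
--     z = [0] * n
--     l = r = 0
--     best = 0
--     for i in range(1, n):
--         zi = min(r - i, z[i - l]) if i < r else 0
--         while i + zi < n and s[zi] == s[i + zi]:
--             zi += 1
--         z[i] = zi
--         if r < i + zi:
--             l, r = i, i + zi
--         if i <= n // 2 and i <= zi:
--             best = i
--     return n if best == 0 else n - best + 1
-- ===== Notes on version B (the rewrite author's own statement) =====
-- stated objective: faster
-- what changed: A tests every prefix length i by comparing the slices s[:i] and s[i:2i] (quadratic total work); B runs the Z-algorithm once, computing z[i] = lcp(s, s[i:]) in O(n) with the [l,r) match-box reuse, then keeps the largest i <= n//2 with z[i] >= i.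
import Mathlib
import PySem

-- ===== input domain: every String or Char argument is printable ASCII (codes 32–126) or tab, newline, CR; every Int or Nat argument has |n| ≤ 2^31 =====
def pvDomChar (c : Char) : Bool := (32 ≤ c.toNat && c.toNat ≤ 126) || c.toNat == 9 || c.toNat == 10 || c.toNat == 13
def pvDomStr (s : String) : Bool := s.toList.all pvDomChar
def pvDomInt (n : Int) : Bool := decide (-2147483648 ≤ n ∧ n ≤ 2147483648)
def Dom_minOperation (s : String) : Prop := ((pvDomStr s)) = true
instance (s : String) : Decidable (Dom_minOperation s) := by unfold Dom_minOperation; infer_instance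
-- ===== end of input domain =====

-- B replaces A's quadratic scan of slice comparisons s[:i] == s[i:2i] by the linear-time
-- Z-algorithm (z[i] = lcp of s and s[i:], computed with the [l,r) match box), keeping the
-- largest i ≤ n//2 with z[i] ≥ i (objective: faster).

-- ===== PORT A =====
-- literal port of A: forward loop over range(1, n//2+1) keeping the last matching i in x
def aLoop (cs : List Char) : Int :=
  (PySem.List.pyRange 1 (PySem.Int.floordiv (cs.length : Int) 2 + 1) 1).foldl
    (fun x i =>
      if PySem.List.slice cs none (some i) == PySem.List.slice cs (some i) (some (i * 2))
      then i else x) 0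

def minOperation (s : String) : Int :=
  if aLoop s.toList = 0 then (s.toList.length : Int)
  else (s.toList.length : Int) - aLoop s.toList + 1

-- ===== PORT B =====
-- the inner 'while i + zi < n and s[zi] == s[i+zi]: zi += 1' of Source B
def extendZ (cs : List Char) (i : Nat) (k : Nat) : Nat :=
  if h : i + k < cs.length ∧ cs.getD k ' ' = cs.getD (i + k) ' ' then
    extendZ cs i (k + 1)
  else k
termination_by cs.length - (i + k)
decreasing_by omega

-- one iteration of Source B's for-loop; state = (z, l, r, best)
def stepB (cs : List Char) (n : Nat) (st : List Nat × Nat × Nat × Nat) (i : Nat) :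
    List Nat × Nat × Nat × Nat :=
  let z := st.1; let l := st.2.1; let r := st.2.2.1; let best := st.2.2.2
  let k0 := if i < r then min (r - i) (z.getD (i - l) 0) else 0
  let zi := extendZ cs i k0
  let z' := z.set i zi
  let lr : Nat × Nat := if r < i + zi then (i, i + zi) else (l, r)
  let best' := if i ≤ n / 2 ∧ i ≤ zi then i else best
  (z', lr.1, lr.2, best')

def minOperation_alt (s : String) : Int :=
  let cs := s.toList
  let n := cs.length
  let st := (List.range' 1 (n - 1)).foldl (stepB cs n) (List.replicate n 0, 0, 0, 0)
  if st.2.2.2 = 0 then (n : Int) else (n : Int) - (st.2.2.2 : Int) + 1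

-- ===== PRECONDITION & SPEC =====
def Spec_minOperation (s : String) (out : Int) : Prop := out = minOperation_alt s
instance (s : String) (out : Int) : Decidable (Spec_minOperation s out) := by unfold Spec_minOperation; infer_instance

-- ===== CLAIM (what is proved, stated in full; the proofs are below) =====
def Claim_equal_minOperation : Prop := ∀ (s : String), Dom_minOperation s → Spec_minOperation s (minOperation s)

-- ===== LEMMAS AND PROOFS =====

-- length of the longest common prefix of two lists
def lcp : List Char → List Char → Nat
  | a :: as, b :: bs => if a = b then lcp as bs + 1 else 0
  | _, _ => 0

-- the Z-function: z[i] = lcp(s, s[i:])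
def zf (cs : List Char) (i : Nat) : Nat := lcp cs (cs.drop i)

-- the largest j ≤ m with P j (0 if none): what A's forward fold maintains
def lastMatch (P : Nat → Prop) [DecidablePred P] : Nat → Nat
  | 0 => 0
  | k + 1 => if P (k + 1) then k + 1 else lastMatch P k

theorem lcp_le_right (a b : List Char) : lcp a b ≤ b.length := by
  induction a generalizing b with
  | nil => cases b <;> simp [lcp]
  | cons x as ih =>
      cases b with
      | nil => simp [lcp]
      | cons y bs =>
          simp only [lcp, List.length_cons]
          split_ifs
          · have := ih bs; omega
          · omega

theorem take_eq_of_le_lcp (a b : List Char) (k : Nat) (h : k ≤ lcp a b) :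
    a.take k = b.take k := by
  induction k generalizing a b with
  | zero => simp
  | succ k ih =>
      cases a with
      | nil => simp [lcp] at h
      | cons x as =>
          cases b with
          | nil => simp [lcp] at h
          | cons y bs =>
              simp only [lcp] at h
              by_cases hxy : x = y
              · rw [if_pos hxy] at h
                simp only [List.take_succ_cons, hxy]
                rw [ih as bs (by omega)]
              · rw [if_neg hxy] at h; omega

theorem lcp_eq_of_take (a b : List Char) (k : Nat) (h : a.take k = b.take k)
    (hk : k ≤ b.length) : lcp a b = k + lcp (a.drop k) (b.drop k) := by
  induction k generalizing a b with
  | zero => simp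
  | succ k ih =>
      cases b with
      | nil => simp at hk
      | cons y bs =>
          cases a with
          | nil => simp at h
          | cons x as =>
              simp only [List.take_succ_cons, List.cons.injEq] at h
              simp only [List.length_cons] at hk
              simp only [lcp, if_pos h.1, List.drop_succ_cons]
              rw [ih as bs h.2 (by omega)]
              omega

theorem le_lcp_of_take (a b : List Char) (k : Nat) (h : a.take k = b.take k)
    (hk : k ≤ b.length) : k ≤ lcp a b := by
  rw [lcp_eq_of_take a b k h hk]; omega

theorem lcp_nil_right (a : List Char) : lcp a [] = 0 := by
  cases a <;> simp [lcp]

theorem extendZ_eq (cs : List Char) (i : Nat) (hi : 1 ≤ i) (k : Nat) :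
    extendZ cs i k = k + lcp (cs.drop k) (cs.drop (i + k)) := by
  induction k using extendZ.induct cs i with
  | case1 k h ih =>
      rw [extendZ, dif_pos h, ih]
      have hik : i + k < cs.length := h.1
      have hk : k < cs.length := by omega
      rw [List.drop_eq_getElem_cons hk, List.drop_eq_getElem_cons hik]
      have hh : cs[k] = cs[i + k] := by
        have := h.2
        rwa [List.getD_eq_getElem cs ' ' hk, List.getD_eq_getElem cs ' ' hik] at this
      simp only [lcp, if_pos hh]
      have : i + (k + 1) = i + k + 1 := by omega
      rw [this]; omega
  | case2 k h =>
      rw [extendZ, dif_neg h]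
      by_cases hik : i + k < cs.length
      · have hk : k < cs.length := by omega
        rw [List.drop_eq_getElem_cons hk, List.drop_eq_getElem_cons hik]
        have hne : ¬ cs[k] = cs[i + k] := by
          intro he
          exact h ⟨hik, by rw [List.getD_eq_getElem cs ' ' hk, List.getD_eq_getElem cs ' ' hik]; exact he⟩
        simp [lcp, hne]
      · have : cs.drop (i + k) = [] := List.drop_eq_nil_of_le (by omega)
        rw [this, lcp_nil_right]; omega

-- extending from any sound start k0 inside the box yields the true z-value
theorem extendZ_start (cs : List Char) (i k0 : Nat) (hi : 1 ≤ i)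
    (hk : k0 ≤ cs.length - i)
    (ht : cs.take k0 = (cs.drop i).take k0) :
    extendZ cs i k0 = zf cs i := by
  rw [extendZ_eq cs i hi k0]
  unfold zf
  rw [lcp_eq_of_take cs (cs.drop i) k0 ht (by simp only [List.length_drop]; omega)]
  rw [List.drop_drop]

-- shifting a prefix-match box: if cs[:b] = cs[l:l+b] then cs[l+d:][:k] = cs[d:][:k] for d+k ≤ b
theorem box_shift (cs : List Char) (l b d k : Nat)
    (hbox : cs.take b = (cs.drop l).take b) (hdk : d + k ≤ b) :
    (cs.drop (l + d)).take k = (cs.drop d).take k := by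
  have h1 : cs.drop (l + d) = (cs.drop l).drop d := by rw [List.drop_drop]
  have h2 : ((cs.drop l).drop d).take k = (((cs.drop l).take (d + k)).drop d).take k := by
    rw [List.drop_take]
    have : d + k - d = k := by omega
    rw [this, List.take_take, Nat.min_self]
  have h3 : (cs.drop l).take (d + k) = cs.take (d + k) := by
    calc (cs.drop l).take (d + k) = ((cs.drop l).take b).take (d + k) := by
            rw [List.take_take, Nat.min_eq_left hdk]
      _ = (cs.take b).take (d + k) := by rw [hbox]
      _ = cs.take (d + k) := by rw [List.take_take, Nat.min_eq_left hdk]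
  rw [h1, h2, h3, List.drop_take]
  have : d + k - d = k := by omega
  rw [this, List.take_take, Nat.min_self]

theorem lastMatch_congr (P Q : Nat → Prop) [DecidablePred P] [DecidablePred Q] (m : Nat)
    (h : ∀ j, 1 ≤ j → j ≤ m → (P j ↔ Q j)) : lastMatch P m = lastMatch Q m := by
  induction m with
  | zero => rfl
  | succ m ih =>
      simp only [lastMatch]
      have hm : P (m + 1) ↔ Q (m + 1) := h (m + 1) (by omega) (by omega)
      rw [ih (fun j h1 h2 => h j h1 (by omega))]
      by_cases hp : Q (m + 1)
      · rw [if_pos (hm.mpr hp), if_pos hp]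
      · rw [if_neg (fun hq => hp (hm.mp hq)), if_neg hp]

theorem lastMatch_trunc (P : Nat → Prop) [DecidablePred P] (c m : Nat) (h : c ≤ m) :
    lastMatch (fun j => j ≤ c ∧ P j) m = lastMatch P c := by
  induction m with
  | zero =>
      have : c = 0 := by omega
      subst this; rfl
  | succ m ih =>
      by_cases hc : c = m + 1
      · subst hc
        exact lastMatch_congr _ _ (m + 1) (fun j h1 h2 => by simp [h2])
      · have hc' : c ≤ m := by omega
        simp only [lastMatch]
        rw [if_neg (by rintro ⟨h1, _⟩; omega)]
        exact ih hc'

theorem foldl_lastMatch (P : Nat → Prop) [DecidablePred P] (m : Nat) :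
    (List.range m).foldl (fun x k => if P (k + 1) then ((k : Int) + 1) else x) 0
      = (lastMatch P m : Int) := by
  induction m with
  | zero => simp [lastMatch]
  | succ k ih =>
      rw [List.range_succ, List.foldl_append, ih]
      simp only [List.foldl_cons, List.foldl_nil, lastMatch]
      split_ifs <;> push_cast <;> ring

-- the loop invariant of Source B's for-loop after the steps i = 1 .. m
def ZInv (cs : List Char) (m : Nat) (st : List Nat × Nat × Nat × Nat) : Prop :=
  st.1.length = cs.length ∧
  (∀ j, 1 ≤ j → j ≤ m → st.1.getD j 0 = zf cs j) ∧
  (∀ j, j = 0 ∨ m < j → st.1.getD j 0 = 0) ∧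
  st.2.1 ≤ m ∧ st.2.2.1 ≤ cs.length ∧
  cs.take (st.2.2.1 - st.2.1) = (cs.drop st.2.1).take (st.2.2.1 - st.2.1) ∧
  st.2.2.2 = lastMatch (fun j => j ≤ cs.length / 2 ∧ j ≤ zf cs j) m

theorem getD_replicate_zero (n j : Nat) : (List.replicate n (0 : Nat)).getD j 0 = 0 := by
  simp only [List.getD, List.getElem?_replicate]
  split <;> rfl

theorem getD_set_self (l : List Nat) (i v j : Nat) (h : i < l.length) (hij : i = j) :
    (l.set i v).getD j 0 = v := by
  subst hij; simp [List.getD, h]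

theorem getD_set_other (l : List Nat) (i v j : Nat) (hij : i ≠ j) :
    (l.set i v).getD j 0 = l.getD j 0 := by
  simp [List.getD, hij]

theorem stepB_inv (cs : List Char) (m : Nat) (st : List Nat × Nat × Nat × Nat)
    (hInv : ZInv cs m st) (hm : m + 1 < cs.length) :
    ZInv cs (m + 1) (stepB cs cs.length st (m + 1)) := by
  obtain ⟨z, l, r, best⟩ := st
  obtain ⟨hlen, hzv, hz0, hl, hr, hbox, hbest⟩ := hInv
  simp only at hlen hzv hz0 hl hr hbox hbest
  set i := m + 1 with hi
  set k0 := if i < r then min (r - i) (z.getD (i - l) 0) else 0 with hk0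
  set zi := extendZ cs i k0 with hzi
  have hstep : stepB cs cs.length (z, l, r, best) i =
      (z.set i zi,
       (if r < i + zi then (i, i + zi) else (l, r)).1,
       (if r < i + zi then (i, i + zi) else (l, r)).2,
       if i ≤ cs.length / 2 ∧ i ≤ zi then i else best) := rfl
  -- the start value k0 is sound: it is bounded and matches a true prefix
  have hk0b : k0 ≤ cs.length - i := by
    rw [hk0]; split_ifs with hir
    · have := min_le_left (r - i) (z.getD (i - l) 0); omega
    · omega
  have htake : cs.take k0 = (cs.drop i).take k0 := by
    rw [hk0]
    split_ifs with hir
    · set d := i - l with hd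
      have hd1 : 1 ≤ d := by omega
      by_cases hdm : d ≤ m
      · have hzd : z.getD d 0 = zf cs d := hzv d hd1 hdm
        set k := min (r - i) (z.getD (i - l) 0) with hk
        have hk1 : k ≤ zf cs d := by
          rw [hk, ← hd, hzd] at *
          exact min_le_right _ _
        have h1 : cs.take k = (cs.drop d).take k := take_eq_of_le_lcp _ _ _ hk1
        have h2 : (cs.drop (l + d)).take k = (cs.drop d).take k :=
          box_shift cs l (r - l) d k hbox (by
            have := min_le_left (r - i) (z.getD (i - l) 0)
            omega)
        have hld : l + d = i := by omega
        rw [hld] at h2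
        rw [h1, h2]
      · -- d = i (so l = 0) and z[d] is still 0: k0 = 0
        have hz : z.getD d 0 = 0 := hz0 d (Or.inr (by omega))
        rw [hz]
        simp
    · simp
  have hzival : zi = zf cs i :=
    extendZ_start cs i k0 (by omega) hk0b htake
  have hzfle : zf cs i ≤ cs.length - i := by
    have := lcp_le_right cs (cs.drop i)
    simp only [List.length_drop] at this
    exact this
  rw [hstep]
  refine ⟨?_, ?_, ?_, ?_, ?_, ?_, ?_⟩
  · simp [hlen]
  · intro j hj1 hj2
    by_cases hji : j = i
    · rw [hji, getD_set_self z i zi i (by omega) rfl, hzival]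
    · have : j ≤ m := by omega
      rw [getD_set_other z i zi j (fun he => hji he.symm)]
      exact hzv j hj1 this
  · intro j hj
    have hji : i ≠ j := by omega
    rw [getD_set_other z i zi j hji]
    exact hz0 j (by omega)
  · by_cases hc : r < i + zi
    · simp only [if_pos hc]; omega
    · simp only [if_neg hc]; omega
  · by_cases hc : r < i + zi
    · simp only [if_pos hc]; omega
    · simp only [if_neg hc]; exact hr
  · by_cases hc : r < i + zi
    · simp only [if_pos hc]
      have he : i + zi - i = zi := by omega
      rw [he, hzival]
      exact take_eq_of_le_lcp cs (cs.drop i) (zf cs i) (le_refl _)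
    · simp only [if_neg hc]; exact hbox
  · simp only [hbest, hzival, hi, lastMatch]

theorem fold_inv (cs : List Char) (m : Nat) (hm : m ≤ cs.length - 1) :
    ZInv cs m ((List.range' 1 m).foldl (stepB cs cs.length)
      (List.replicate cs.length 0, 0, 0, 0)) := by
  induction m with
  | zero =>
      refine ⟨by simp, ?_, ?_, by simp, by simp, by simp, rfl⟩
      · intro j hj1 hj2; omega
      · intro j _; exact getD_replicate_zero cs.length j
  | succ m ih =>
      have hm' : m ≤ cs.length - 1 := by omega
      have hcons : List.range' 1 (m + 1) = List.range' 1 m ++ [1 + m] := by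
        have := List.range'_concat (s := 1) (n := m) (step := 1)
        simpa using this
      rw [hcons, List.foldl_append, List.foldl_cons, List.foldl_nil]
      have h1m : 1 + m = m + 1 := by omega
      rw [h1m]
      exact stepB_inv cs m _ (ih hm') (by omega)

theorem aLoop_eq (cs : List Char) :
    aLoop cs = (lastMatch (fun i => cs.take i = (cs.drop i).take i) (cs.length / 2) : Int) := by
  unfold aLoop
  have hfd : PySem.Int.floordiv (cs.length : Int) 2 = ((cs.length / 2 : Nat) : Int) := by
    exact_mod_cast PySem.Int.floordiv_natCast cs.length 2
  rw [hfd, PySem.List.pyRange_one]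
  have hlen : (((cs.length / 2 : Nat) : Int) + 1 - 1).toNat = cs.length / 2 := by omega
  rw [hlen, List.foldl_map]
  have hfun : (fun (x : Int) (k : Nat) =>
      if PySem.List.slice cs none (some (1 + (k : Int))) ==
         PySem.List.slice cs (some (1 + (k : Int))) (some ((1 + (k : Int)) * 2))
      then 1 + (k : Int) else x)
      = (fun (x : Int) (k : Nat) =>
          if cs.take (k + 1) = (cs.drop (k + 1)).take (k + 1) then ((k : Int) + 1) else x) := by
    funext x k
    have h1 : (1 + (k : Int)) = ((k + 1 : Nat) : Int) := by push_cast; ring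
    have h2 : ((k + 1 : Nat) : Int) * 2 = (((k + 1) * 2 : Nat) : Int) := by push_cast; ring
    rw [h1, h2, PySem.List.slice_to_natCast, PySem.List.slice_natCast]
    have h3 : (k + 1) * 2 - (k + 1) = k + 1 := by omega
    rw [h3]
    simp only [beq_iff_eq]
    split_ifs <;> push_cast <;> ring
  rw [hfun]
  exact foldl_lastMatch (fun i => cs.take i = (cs.drop i).take i) (cs.length / 2)

-- for 1 ≤ i ≤ n/2, A's slice test equals B's z-test
theorem cond_iff (cs : List Char) (i : Nat) (_hi1 : 1 ≤ i) (hi2 : i ≤ cs.length / 2) :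
    (i ≤ zf cs i) ↔ (cs.take i = (cs.drop i).take i) := by
  constructor
  · intro h; exact take_eq_of_le_lcp cs (cs.drop i) i h
  · intro h
    apply le_lcp_of_take cs (cs.drop i) i h
    simp only [List.length_drop]; omega

-- ===== VERDICT (by name: the statement is the Claim_ definition above) =====
theorem minOperation_spec : Claim_equal_minOperation := by
  intro s _
  unfold Spec_minOperation minOperation minOperation_alt
  set cs := s.toList with hcs
  set n := cs.length with hn
  show _ = (if ((List.range' 1 (n - 1)).foldl (stepB cs n) (List.replicate n 0, 0, 0, 0)).2.2.2 = 0
            then (n : Int)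
            else (n : Int) - (((List.range' 1 (n - 1)).foldl (stepB cs n) (List.replicate n 0, 0, 0, 0)).2.2.2 : Int) + 1)
  obtain ⟨-, -, -, -, -, -, hbest⟩ := fold_inv cs (n - 1) (le_refl _)
  have htr : lastMatch (fun j => j ≤ n / 2 ∧ j ≤ zf cs j) (n - 1)
      = lastMatch (fun j => j ≤ zf cs j) (n / 2) :=
    lastMatch_trunc _ (n / 2) (n - 1) (by omega)
  have hcong : lastMatch (fun j => j ≤ zf cs j) (n / 2)
      = lastMatch (fun j => cs.take j = (cs.drop j).take j) (n / 2) :=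
    lastMatch_congr _ _ _ (fun j h1 h2 => cond_iff cs j h1 h2)
  rw [aLoop_eq, hbest, htr, hcong]
  split_ifs <;> simp_all
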